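-- pv_equiv track=rewrite | github.com/denigma/denigma | denigma/apps/shorty/models.py | alphabet_encode
-- ===== SOURCE A (Python) =====
-- ALPHABET = "23456789abcdefghijkmnpqrstuvwxyzABCDEFGHJKLMNPQRSTUVWXYZ"
--
-- def alphabet_encode(num, alphabet=ALPHABET):
--     base = len(alphabet)
--     num += base
--
--     arr = []
--
--     while num:
--         rem = num % base
--         num = num // base
--         arr.append(alphabet[rem])
--     arr.reverse()
--     return ''.join(arr)
-- ===== SOURCE B (Python) =====
-- ALPHABET = "23456789abcdefghijkmnpqrstuvwxyzABCDEFGHJKLMNPQRSTUVWXYZ"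
--
-- def alphabet_encode(num, alphabet=ALPHABET):
--     base = len(alphabet)
--     n = num + base
--     if n == 0:
--         return ''
--     # find the highest power of base not exceeding n
--     p = 1
--     while p * base <= n:
--         p *= base
--     # read digits positionally, most significant first
--     out = ''
--     while p >= 1:
--         out += alphabet[(n // p) % base]
--         p //= base
--     return out
-- ===== Notes on version B (the rewrite author's own statement) =====
-- stated objective: alternative
-- what changed: Instead of repeatedly dividing the number while collecting digits LSB-first into a list and reversing it, B first finds the highest power of the base not exceeding the number and then reads each digit positionally ((n // p) % base) from the most significant position down, never mutating n.
import Mathlib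
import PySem

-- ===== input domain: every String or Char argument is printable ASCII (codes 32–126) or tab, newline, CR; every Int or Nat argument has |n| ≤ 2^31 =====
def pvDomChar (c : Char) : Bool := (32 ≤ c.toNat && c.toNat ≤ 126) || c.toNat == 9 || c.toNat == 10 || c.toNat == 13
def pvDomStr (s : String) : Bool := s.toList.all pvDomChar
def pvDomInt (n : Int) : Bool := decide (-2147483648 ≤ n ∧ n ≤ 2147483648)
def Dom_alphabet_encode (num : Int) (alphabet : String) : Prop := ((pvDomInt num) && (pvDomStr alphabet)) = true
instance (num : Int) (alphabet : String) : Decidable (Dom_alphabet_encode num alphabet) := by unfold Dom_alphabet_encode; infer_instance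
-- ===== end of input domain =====

-- B replaces A's divide-and-collect-LSB-first/reverse/join loop by a positional read: it
-- first finds the highest power of the base not exceeding the number, then emits each digit
-- (n // p) % base from the most significant position down (objective: alternative);
-- exact same values wherever A returns.

-- ===== PORT A =====
-- the while-loop: appends alphabet[num % base] LSB-first; the second branch is a totality
-- guard only — there Python's loop never terminates (excluded by Pre_)
def aLoop (base : Int) (alph : List Char) (num : Int) (arr : List Char) : List Char :=
  if num = 0 then arr
  else if num < 0 ∨ base ≤ 1 then arr
  else
    aLoop base alph (PySem.Int.floordiv num base)
      (arr ++ [PySem.List.pyGetD alph (PySem.Int.mod num base) ' '])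
termination_by num.toNat
decreasing_by
  rename_i h0 h1
  rw [not_or, not_lt] at h1
  have hb : (0:Int) < base := by omega
  have hpos : (0:Int) < num := by omega
  have h2 : PySem.Int.floordiv num base < num :=
    (PySem.Int.floordiv_lt_iff_lt_mul hb).mpr (by nlinarith)
  omega

def alphabet_encode (num : Int) (alphabet : String) : String :=
  let base : Int := (alphabet.toList.length : Int)
  let num := num + base
  String.ofList (aLoop base alphabet.toList num []).reverse

-- ===== PORT B =====
-- first while-loop of B: p = 1; while p * base <= n: p *= base.  The first branch is a
-- totality guard only — there Python's loop never terminates (excluded by Pre_)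
def bPow (base : Int) (n : Int) (p : Int) : Int :=
  if base ≤ 1 ∨ p < 1 then p
  else if p * base ≤ n then bPow base n (p * base)
  else p
termination_by (n - p).toNat
decreasing_by
  rename_i h0 h1
  rw [not_or, not_lt] at h0
  have h2 : p + p ≤ p * base := by nlinarith
  omega

-- second while-loop of B: while p >= 1: out += alphabet[(n // p) % base]; p //= base.
-- The base ≤ 1 branch is a totality guard only — there Python's loop never terminates
-- or raises ZeroDivisionError (excluded by Pre_)
def bRead (base : Int) (alph : List Char) (n : Int) (p : Int) : List Char :=
  if p < 1 then []
  else if base ≤ 1 then []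
  else
    PySem.List.pyGetD alph (PySem.Int.mod (PySem.Int.floordiv n p) base) ' ' ::
      bRead base alph n (PySem.Int.floordiv p base)
termination_by p.toNat
decreasing_by
  rename_i h0 h1
  rw [not_lt] at h0
  rw [not_le] at h1
  have h2 : PySem.Int.floordiv p base < p :=
    (PySem.Int.floordiv_lt_iff_lt_mul (by omega)).mpr (by nlinarith)
  omega

def alphabet_encode_alt (num : Int) (alphabet : String) : String :=
  let base : Int := (alphabet.toList.length : Int)
  let n := num + base
  if n = 0 then ""
  else String.ofList (bRead base alphabet.toList n (bPow base n 1))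

-- ===== PRECONDITION & SPEC =====
-- Pre_ excludes exactly the inputs where A does not return: num + len(alphabet) < 0 (the
-- while-loop runs forever on a negative num), and num + len(alphabet) > 0 with len(alphabet) = 0
-- (ZeroDivisionError) or len(alphabet) = 1 (num // 1 never shrinks, loop runs forever).
def Pre_alphabet_encode (num : Int) (alphabet : String) : Prop :=
  0 ≤ num + (alphabet.toList.length : Int) ∧
    (num + (alphabet.toList.length : Int) = 0 ∨ 2 ≤ (alphabet.toList.length : Int))
instance (num : Int) (alphabet : String) : Decidable (Pre_alphabet_encode num alphabet) := by
  unfold Pre_alphabet_encode; infer_instance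

def pvWitness_alphabet_encode : Int × String := (5, "01")

def Spec_alphabet_encode (num : Int) (alphabet : String) (out : String) : Prop := out = alphabet_encode_alt num alphabet
instance (num : Int) (alphabet : String) (out : String) : Decidable (Spec_alphabet_encode num alphabet out) := by unfold Spec_alphabet_encode; infer_instance

-- ===== CLAIM (what is proved, stated in full; the proofs are below) =====
def Claim_equal_alphabet_encode : Prop := ∀ (num : Int) (alphabet : String), Dom_alphabet_encode num alphabet → Pre_alphabet_encode num alphabet → Spec_alphabet_encode num alphabet (alphabet_encode num alphabet)

-- ===== LEMMAS AND PROOFS =====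

-- proof helper: the digit list of n, most significant first (no leading zeros)
def digitsOf (base : Int) (alph : List Char) (n : Int) : List Char :=
  if n = 0 then []
  else if n < 0 ∨ base ≤ 1 then []
  else digitsOf base alph (PySem.Int.floordiv n base) ++
    [PySem.List.pyGetD alph (PySem.Int.mod n base) ' ']
termination_by n.toNat
decreasing_by
  rename_i h0 h1
  rw [not_or, not_lt] at h1
  have hpos : (0:Int) < n := by omega
  have h2 : PySem.Int.floordiv n base < n :=
    (PySem.Int.floordiv_lt_iff_lt_mul (by omega)).mpr (by nlinarith)
  omega

-- proof helper: the m lowest digits of n, most significant first (fixed width)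
def fixW (base : Int) (alph : List Char) : Nat → Int → List Char
  | 0, _ => []
  | m + 1, n => fixW base alph m (PySem.Int.floordiv n base) ++
      [PySem.List.pyGetD alph (PySem.Int.mod n base) ' ']

-- A's loop leaves arr followed by the digit list (A collects LSB-first, then reverses).
theorem aLoop_eq_digits (base : Int) (alph : List Char) (num : Int) (arr : List Char) :
    aLoop base alph num arr = arr ++ (digitsOf base alph num).reverse := by
  induction num, arr using aLoop.induct base alph with
  | case1 arr => rw [aLoop, digitsOf]; simp
  | case2 num arr h0 h1 => rw [aLoop, digitsOf]; simp [h0, h1]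
  | case3 num arr h0 h1 ih =>
      rw [aLoop, digitsOf]
      simp only [h0, h1, if_false]
      rw [ih]
      simp

theorem fixW_cons (base : Int) (alph : List Char) (hb : 2 ≤ base) (m : Nat) :
    ∀ n : Int, 0 ≤ n →
      fixW base alph (m + 1) n =
        PySem.List.pyGetD alph
            (PySem.Int.mod (PySem.Int.floordiv n (base ^ m)) base) ' ' :: fixW base alph m n := by
  induction m with
  | zero =>
      intro n hn
      simp [fixW]
  | succ m ih =>
      intro n hn
      have hb0 : (0:Int) < base := by omega
      show fixW base alph (m + 1) (PySem.Int.floordiv n base) ++ _ = _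
      rw [ih (PySem.Int.floordiv n base)
          (by rw [PySem.Int.floordiv_eq_ediv_of_pos hb0]; exact Int.ediv_nonneg hn (le_of_lt hb0))]
      have hdd : PySem.Int.floordiv (PySem.Int.floordiv n base) (base ^ m) =
          PySem.Int.floordiv n (base ^ (m + 1)) := by
        rw [PySem.Int.floordiv_eq_ediv_of_pos hb0,
            PySem.Int.floordiv_eq_ediv_of_pos (show (0:Int) < base ^ m by positivity),
            PySem.Int.floordiv_eq_ediv_of_pos (show (0:Int) < base ^ (m+1) by positivity),
            Int.ediv_ediv_of_nonneg (le_of_lt hb0), ← pow_succ']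
      rw [hdd]
      rfl

theorem bRead_eq_fixW (base : Int) (alph : List Char) (hb : 2 ≤ base) (k : Nat) (n : Int)
    (hn : 0 ≤ n) : bRead base alph n (base ^ k) = fixW base alph (k + 1) n := by
  have hb0 : (0:Int) < base := by omega
  induction k with
  | zero =>
      rw [bRead]
      have h1 : ¬ ((1:Int) < 1) := by norm_num
      have hfd : PySem.Int.floordiv (1:Int) base = 0 := by
        rw [PySem.Int.floordiv_eq_ediv_of_pos hb0]
        exact Int.ediv_eq_zero_of_lt (by norm_num) (by omega)
      simp only [pow_zero, h1, if_false, if_neg (by omega : ¬ base ≤ 1), hfd]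
      rw [bRead]
      simp only [show ((0:Int) < 1) = True by simp, if_true]
      rw [fixW_cons base alph hb 0 n hn]
      simp [fixW]
  | succ k ih =>
      rw [bRead]
      have hp1 : (1:Int) ≤ base ^ (k+1) := one_le_pow₀ (by omega)
      have hfd : PySem.Int.floordiv (base ^ (k+1)) base = base ^ k := by
        rw [PySem.Int.floordiv_eq_ediv_of_pos hb0, pow_succ,
            Int.mul_ediv_cancel _ (by omega)]
      simp only [if_neg (by omega : ¬ base ^ (k+1) < 1), if_neg (by omega : ¬ base ≤ 1), hfd]
      rw [ih, fixW_cons base alph hb (k+1) n hn]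

theorem fixW_eq_digits (base : Int) (alph : List Char) (hb : 2 ≤ base) (m : Nat) :
    ∀ n : Int, base ^ m ≤ n → n < base ^ (m + 1) →
      fixW base alph (m + 1) n = digitsOf base alph n := by
  have hb0 : (0:Int) < base := by omega
  induction m with
  | zero =>
      intro n h1 h2
      simp only [pow_zero] at h1
      simp only [zero_add, pow_one] at h2
      rw [fixW, digitsOf]
      have hfd : PySem.Int.floordiv n base = 0 := by
        rw [PySem.Int.floordiv_eq_ediv_of_pos hb0]
        exact Int.ediv_eq_zero_of_lt (by omega) h2
      rw [if_neg (by omega : ¬ n = 0), if_neg (by rw [not_or]; constructor <;> omega)]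
      rw [hfd, digitsOf]
      simp [fixW]
  | succ m ih =>
      intro n h1 h2
      have hm1 : (1:Int) ≤ base ^ (m+1) := one_le_pow₀ (by omega)
      have hn0 : (0:Int) < n := by omega
      rw [fixW, digitsOf, if_neg (by omega : ¬ n = 0),
          if_neg (by rw [not_or]; constructor <;> omega)]
      congr 1
      apply ih
      · rw [PySem.Int.le_floordiv_iff_mul_le hb0, ← pow_succ]
        exact h1
      · rw [PySem.Int.floordiv_lt_iff_lt_mul hb0, ← pow_succ]
        exact h2

theorem bPow_spec (base n : Int) (hb : 2 ≤ base) :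
    ∀ p : Int, (∃ j : Nat, p = base ^ j) → p ≤ n →
      ∃ k : Nat, bPow base n p = base ^ k ∧ base ^ k ≤ n ∧ n < base ^ (k + 1) := by
  intro p
  induction p using bPow.induct base n with
  | case1 p h0 =>
      rintro ⟨j, rfl⟩ hpn
      exfalso
      rcases h0 with h | h
      · omega
      · have : (1:Int) ≤ base ^ j := one_le_pow₀ (by omega)
        omega
  | case2 p h0 h1 ih =>
      rintro ⟨j, rfl⟩ hpn
      rw [bPow, if_neg h0, if_pos h1]
      exact ih ⟨j + 1, by rw [pow_succ]⟩ h1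
  | case3 p h0 h1 =>
      rintro ⟨j, rfl⟩ hpn
      rw [bPow, if_neg h0, if_neg h1]
      exact ⟨j, rfl, hpn, by rw [pow_succ]; omega⟩

-- ===== VERDICT (by name: the statement is the Claim_ definition above) =====
theorem alphabet_encode_spec : Claim_equal_alphabet_encode := by
  intro num alphabet _ hpre
  unfold Spec_alphabet_encode
  obtain ⟨h0, h1⟩ := hpre
  simp only [alphabet_encode, alphabet_encode_alt]
  set base : Int := (alphabet.toList.length : Int) with hbase
  set n : Int := num + base with hn
  rw [aLoop_eq_digits]
  simp only [List.nil_append, List.reverse_reverse]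
  by_cases hz : n = 0
  · rw [if_pos hz, hz, digitsOf]
    simp
  · rw [if_neg hz]
    have hb : 2 ≤ base := by
      rcases h1 with h | h
      · exact absurd h hz
      · exact h
    have hn1 : 1 ≤ n := by omega
    obtain ⟨k, hk, hk1, hk2⟩ :=
      bPow_spec base n hb 1 ⟨0, by rw [pow_zero]⟩ hn1
    rw [hk, bRead_eq_fixW base alphabet.toList hb k n (by omega),
        fixW_eq_digits base alphabet.toList hb k n hk1 hk2]
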